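-- pv_equiv track=rewrite | github.com/nbooster/AoC | 2024/day22.py | getDiffsToPrices
-- ===== SOURCE A (Python) =====
-- def nextSecretNumber(x):
--     x = (x ^ (x * 64)) % 16777216
--     x = (x ^ int(x // 32)) % 16777216
--     return (x ^ (x * 2048)) % 16777216
--
-- def getDiffsToPrices(x, N):
--     prices = [ x % 10 ]
--
--     for _ in range(N):
--         x = nextSecretNumber(x)
--         prices.append(x % 10)
--
--     diffs = [ None ] + [ prices[i] - prices[i - 1] for i in range(1, N) ]
--
--     DiffsToPrices = dict()
--
--     for i in range(4, len(diffs)):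
--         key = tuple(diffs[i-3 : i+1])
--
--         if key not in DiffsToPrices:
--             DiffsToPrices[key] = prices[i]
--
--     return DiffsToPrices
-- ===== SOURCE B (Python) =====
-- def nextSecret(x):
--     x = (x ^ (x * 64)) % 16777216
--     x = (x ^ (x // 32)) % 16777216
--     return (x ^ (x * 2048)) % 16777216
--
-- def getDiffsToPrices(x, N):
--     # Single streaming pass: generate the secret numbers one by one, keep only
--     # the previous price and a rolling window of the last four diffs; no
--     # materialized prices/diffs lists.  (A's last diff prices[N]-prices[N-1] is
--     # never used, so only N-1 steps are needed.)
--     res = {}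
--     prev = x % 10
--     w = []
--     for _ in range(1, N):
--         x = nextSecret(x)
--         p = x % 10
--         w = w + [p - prev]
--         if len(w) > 4:
--             w = w[1:]
--         if len(w) == 4:
--             res.setdefault(tuple(w), p)
--         prev = p
--     return res
-- ===== Notes on version B (the rewrite author's own statement) =====
-- stated objective: alternative
-- what changed: B replaces A's three materialized passes (build the full prices list, build a diffs list, then slice a 4-diff window per index with an if-key-absent dict guard) by a single streaming pass over the secret-number generation that keeps only the previous price and a rolling window of the last four diffs and records each full window with dict.setdefault.
import Mathlib
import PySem

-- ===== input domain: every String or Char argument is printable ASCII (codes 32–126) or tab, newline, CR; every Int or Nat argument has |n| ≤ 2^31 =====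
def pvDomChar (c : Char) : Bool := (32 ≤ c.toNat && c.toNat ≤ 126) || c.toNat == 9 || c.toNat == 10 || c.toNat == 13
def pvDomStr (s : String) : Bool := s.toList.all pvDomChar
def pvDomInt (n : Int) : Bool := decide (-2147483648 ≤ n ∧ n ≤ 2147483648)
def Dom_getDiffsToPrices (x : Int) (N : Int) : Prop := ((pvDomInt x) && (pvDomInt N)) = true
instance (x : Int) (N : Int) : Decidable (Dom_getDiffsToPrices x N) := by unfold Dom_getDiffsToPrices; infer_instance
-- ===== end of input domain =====

-- B replaces A's materialized prices/diffs lists and slice-per-window by a single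
-- streaming pass keeping only the previous price and a rolling 4-diff window (objective: alternative).

-- ===== PORT A =====
def nextSecretNumber (x : Int) : Int :=
  let x1 := PySem.Int.mod (PySem.Int.bxor x (x * 64)) 16777216
  let x2 := PySem.Int.mod (PySem.Int.bxor x1 (PySem.Int.floordiv x1 32)) 16777216
  PySem.Int.mod (PySem.Int.bxor x2 (x2 * 2048)) 16777216

def getDiffsToPrices (x : Int) (N : Int) : List (List Int × Int) :=
  let st := (PySem.List.pyRange 0 N 1).foldl
    (fun (st : Int × List Int) _ =>
      let x' := nextSecretNumber st.1
      (x', st.2 ++ [PySem.Int.mod x' 10]))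
    (x, [PySem.Int.mod x 10])
  let prices := st.2
  let diffs : List (Option Int) :=
    none :: (PySem.List.pyRange 1 N 1).map
      (fun i => some (PySem.List.pyGetD prices i 0 - PySem.List.pyGetD prices (i - 1) 0))
  let d := (PySem.List.pyRange 4 (PySem.List.len diffs) 1).foldl
    (fun (d : PySem.Dict (List (Option Int)) Int) i =>
      let key := PySem.List.slice diffs (some (i - 3)) (some (i + 1))
      if d.contains key then d
      else d.insert key (PySem.List.pyGetD prices i 0))
    PySem.Dict.empty
  -- the Python dict keys are 4-tuples of ints (index 0 of diffs is never sliced);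
  -- per the type convention they become List Int
  d.items.map (fun kv => (kv.1.map (fun o => o.getD 0), kv.2))

-- ===== PORT B =====
def nextSecret (x : Int) : Int :=
  let x1 := PySem.Int.mod (PySem.Int.bxor x (x * 64)) 16777216
  let x2 := PySem.Int.mod (PySem.Int.bxor x1 (PySem.Int.floordiv x1 32)) 16777216
  PySem.Int.mod (PySem.Int.bxor x2 (x2 * 2048)) 16777216

def getDiffsToPrices_alt (x : Int) (N : Int) : List (List Int × Int) :=
  let st := (PySem.List.pyRange 1 N 1).foldl
    (fun (st : Int × Int × List Int × PySem.Dict (List Int) Int) _ =>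
      let x' := nextSecret st.1
      let p := PySem.Int.mod x' 10
      let w1 := st.2.2.1 ++ [p - st.2.1]
      let w := if 4 < PySem.List.len w1 then PySem.List.slice w1 (some 1) none else w1
      let res := if PySem.List.len w = 4 then PySem.Dict.setdefault st.2.2.2 w p else st.2.2.2
      (x', p, w, res))
    (x, PySem.Int.mod x 10, ([] : List Int), (PySem.Dict.empty : PySem.Dict (List Int) Int))
  st.2.2.2.items

-- ===== PRECONDITION & SPEC =====
def Spec_getDiffsToPrices (x : Int) (N : Int) (out : List (List Int × Int)) : Prop := out = getDiffsToPrices_alt x N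
instance (x : Int) (N : Int) (out : List (List Int × Int)) : Decidable (Spec_getDiffsToPrices x N out) := by unfold Spec_getDiffsToPrices; infer_instance

-- ===== CLAIM (what is proved, stated in full; the proofs are below) =====
def Claim_equal_getDiffsToPrices : Prop := ∀ (x : Int) (N : Int), Dom_getDiffsToPrices x N → Spec_getDiffsToPrices x N (getDiffsToPrices x N)

-- ===== LEMMAS AND PROOFS =====

-- the secret-number sequence, its prices, diffs and 4-diff window keys
def pvS (x : Int) : Nat → Int
  | 0 => x
  | k + 1 => nextSecret (pvS x k)

def pvP (x : Int) (k : Nat) : Int := PySem.Int.mod (pvS x k) 10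

def pvD (x : Int) (k : Nat) : Int := pvP x k - pvP x (k - 1)

def pvK (x : Int) (i : Nat) : List Int := [pvD x (i - 3), pvD x (i - 2), pvD x (i - 1), pvD x i]

-- the first-wins dict after having seen the windows ending at 4 .. j
def pvRefD (x : Int) : Nat → PySem.Dict (List Int) Int
  | 0 => PySem.Dict.empty
  | j + 1 =>
    if 4 ≤ j + 1 then PySem.Dict.setdefault (pvRefD x j) (pvK x (j + 1)) (pvP x (j + 1))
    else pvRefD x j

-- B's rolling window after iteration j
def pvW (x : Int) : Nat → List Int
  | 0 => []
  | j + 1 =>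
    let w1 := pvW x j ++ [pvD x (j + 1)]
    if 4 < w1.length then w1.tail else w1

def pvPrices (x : Int) (n : Nat) : List Int := (List.range (n + 1)).map (pvP x)

def pvDiffs (x : Int) (n : Nat) : List (Option Int) :=
  none :: (List.range (n - 1)).map (fun k => some (pvD x (k + 1)))

def pvF : List Int × Int → List (Option Int) × Int := fun kv => (kv.1.map some, kv.2)

lemma pvPrices_lemma (x : Int) (n : Nat) :
    (PySem.List.pyRange 0 (n : Int) 1).foldl
      (fun (st : Int × List Int) _ =>
        let x' := nextSecretNumber st.1
        (x', st.2 ++ [PySem.Int.mod x' 10]))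
      (x, [PySem.Int.mod x 10]) = (pvS x n, pvPrices x n) := by
  induction n with
  | zero => simp [PySem.List.pyRange_one_eq_nil, pvPrices, pvS, pvP]
  | succ n ih =>
    have hc : ((n + 1 : Nat) : Int) = (n : Int) + 1 := by push_cast; ring
    rw [hc, PySem.List.pyRange_one_succ_right (by positivity), List.foldl_append, ih]
    simp [pvPrices, pvS, pvP, List.range_succ, nextSecretNumber, nextSecret]

lemma pvDiffs_lemma (x : Int) (n : Nat) (_hn : 1 ≤ n) :
    (none :: (PySem.List.pyRange 1 (n : Int) 1).map
      (fun i => some (PySem.List.pyGetD (pvPrices x n) i 0 -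
                      PySem.List.pyGetD (pvPrices x n) (i - 1) 0))) = pvDiffs x n := by
  rw [PySem.List.pyRange_one, pvDiffs]
  have h1 : ((n : Int) - 1).toNat = n - 1 := by omega
  rw [h1, List.map_map]
  congr 1
  apply List.map_congr_left
  intro k hk
  have hk' : k < n - 1 := List.mem_range.mp hk
  have e1 : (1 : Int) + (k : Int) = ((k + 1 : Nat) : Int) := by push_cast; ring
  have e2 : ((k + 1 : Nat) : Int) - 1 = ((k : Nat) : Int) := by push_cast; ring
  simp only [Function.comp_apply, e1, e2, PySem.List.pyGetD_natCast, pvPrices]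
  rw [PySem.List.getD_map_range _ _ _ _ (by omega), PySem.List.getD_map_range _ _ _ _ (by omega)]
  simp [pvD]

lemma pvKey_lemma (x : Int) (n m : Nat) (h4 : 4 ≤ m) (hm : m < n) :
    PySem.List.slice (pvDiffs x n) (some ((m : Int) - 3)) (some ((m : Int) + 1)) =
      (pvK x m).map some := by
  obtain ⟨a, rfl⟩ : ∃ a, m = a + 4 := ⟨m - 4, by omega⟩
  have e1 : ((a + 4 : Nat) : Int) - 3 = ((a + 1 : Nat) : Int) := by push_cast; ring
  have e2 : ((a + 4 : Nat) : Int) + 1 = ((a + 5 : Nat) : Int) := by push_cast; ring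
  rw [e1, e2, PySem.List.slice_natCast]
  have hlen : (pvDiffs x n).length = n := by simp [pvDiffs]; omega
  apply List.ext_getElem
  · simp [pvK, hlen]; omega
  · intro i h1 h2
    have hi : i < 4 := by simpa [pvK] using h2
    have h3 : a + 1 + i < (pvDiffs x n).length := by
      simp [hlen]; omega
    have hd : ∀ (j : Nat) (hj1 : 1 ≤ j) (hj2 : j < n), (pvDiffs x n)[j]'(by omega) = some (pvD x j) := by
      intro j hj1 hj2
      obtain ⟨b, rfl⟩ : ∃ b, j = b + 1 := ⟨j - 1, by omega⟩
      simp [pvDiffs]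
    rw [List.getElem_take, List.getElem_drop]
    interval_cases i <;>
      simp only [pvK, List.map_cons, List.map_nil] <;>
      rw [hd _ (by omega) (by omega)] <;> norm_num <;> exact congrArg (pvD x) (by omega)

lemma pv_beq_map_some (u v : List Int) : (u.map some == v.map some) = (u == v) := by
  rw [beq_eq_decide, beq_eq_decide]
  exact decide_eq_decide.mpr (List.map_inj_right (fun _ _ h => Option.some.inj h))

lemma pv_contains_map (d : PySem.Dict (List Int) Int) (k : List Int) :
    (PySem.Dict.mk (d.items.map pvF)).contains (k.map some) = d.contains k := by
  simp only [PySem.Dict.contains, List.any_map]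
  exact List.any_congr rfl (fun kv => pv_beq_map_some kv.1 k)

lemma pvRefD_small (x : Int) (j : Nat) (hj : j ≤ 3) : pvRefD x j = PySem.Dict.empty := by
  induction j with
  | zero => rfl
  | succ j ih =>
    rw [pvRefD, if_neg (by omega)]
    exact ih (by omega)

lemma pvRefD_succ (x : Int) (j : Nat) (hj : 4 ≤ j + 1) :
    pvRefD x (j + 1) = PySem.Dict.setdefault (pvRefD x j) (pvK x (j + 1)) (pvP x (j + 1)) := by
  rw [pvRefD, if_pos hj]

lemma pv_value_lemma (x : Int) (n m : Nat) (hm : m ≤ n) :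
    PySem.List.pyGetD (pvPrices x n) (m : Int) 0 = pvP x m := by
  simp only [PySem.List.pyGetD_natCast, pvPrices]
  rw [PySem.List.getD_map_range _ _ _ _ (by omega)]

lemma pvDictA_lemma (x : Int) (n : Nat) (_hn : 1 ≤ n) :
    ∀ m : Nat, m ≤ n →
    (PySem.List.pyRange 4 (m : Int) 1).foldl
      (fun (d : PySem.Dict (List (Option Int)) Int) i =>
        let key := PySem.List.slice (pvDiffs x n) (some (i - 3)) (some (i + 1))
        if d.contains key then d
        else d.insert key (PySem.List.pyGetD (pvPrices x n) i 0))
      PySem.Dict.empty = PySem.Dict.mk ((pvRefD x (m - 1)).items.map pvF) := by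
  intro m
  induction m with
  | zero =>
    intro _
    rw [PySem.List.pyRange_one_eq_nil (by norm_num)]
    simp [pvRefD, PySem.Dict.empty]
  | succ m ih =>
    intro hm
    by_cases h4 : 4 ≤ m
    · have hc : ((m + 1 : Nat) : Int) = (m : Int) + 1 := by push_cast; ring
      rw [hc, PySem.List.pyRange_one_succ_right (by exact_mod_cast h4), List.foldl_append,
        ih (by omega)]
      simp only [List.foldl_cons, List.foldl_nil]
      rw [pvKey_lemma x n m h4 (by omega), pv_contains_map, pv_value_lemma x n m (by omega)]
      obtain ⟨j, rfl⟩ : ∃ j, m = j + 1 := ⟨m - 1, by omega⟩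
      rw [show j + 1 + 1 - 1 = (j + 1 - 1) + 1 from rfl, pvRefD_succ x (j + 1 - 1) (by omega),
        show j + 1 - 1 + 1 = j + 1 from rfl]
      rw [PySem.Dict.setdefault]
      by_cases hc2 : (pvRefD x (j + 1 - 1)).contains (pvK x (j + 1)) = true
      · rw [if_pos hc2, if_pos hc2]
      · rw [if_neg hc2, if_neg hc2, PySem.Dict.insert, pv_contains_map, if_neg hc2]
        simp [pvF]
    · rw [PySem.List.pyRange_one_eq_nil (by exact_mod_cast by omega : ((m + 1 : Nat) : Int) ≤ 4)]
      rw [pvRefD_small x (m + 1 - 1) (by omega)]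
      simp [PySem.Dict.empty]

def pvLdiffs (x : Int) (j : Nat) : List Int := (List.range j).map (fun k => pvD x (k + 1))

lemma pvW_closed (x : Int) (j : Nat) : pvW x j = (pvLdiffs x j).drop (j - 4) := by
  induction j with
  | zero => rfl
  | succ j ih =>
    have hlen : (pvLdiffs x j).length = j := by simp [pvLdiffs]
    rw [pvW, ih]
    have hL : pvLdiffs x (j + 1) = pvLdiffs x j ++ [pvD x (j + 1)] := by
      simp [pvLdiffs, List.range_succ]
    have happ : (pvLdiffs x j).drop (j - 4) ++ [pvD x (j + 1)] =
        (pvLdiffs x (j + 1)).drop (j - 4) := by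
      rw [hL, List.drop_append_of_le_length (by omega)]
    simp only [happ]
    have hlen2 : ((pvLdiffs x (j + 1)).drop (j - 4)).length = (j + 1) - (j - 4) := by
      simp [pvLdiffs]
    by_cases h4 : 4 ≤ j
    · rw [if_pos (by omega), List.tail_drop]
      congr 1
      omega
    · rw [if_neg (by omega)]
      congr 1
      omega

lemma pvW_length (x : Int) (j : Nat) : (pvW x j).length = min j 4 := by
  rw [pvW_closed]
  simp [pvLdiffs]
  omega

lemma pvW_eq_pvK (x : Int) (j : Nat) (hj : 4 ≤ j) : pvW x j = pvK x j := by
  rw [pvW_closed]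
  obtain ⟨a, rfl⟩ : ∃ a, j = a + 4 := ⟨j - 4, by omega⟩
  apply List.ext_getElem
  · simp [pvLdiffs, pvK]
  · intro i h1 h2
    have hi : i < 4 := by simpa [pvK] using h2
    rw [List.getElem_drop]
    simp only [pvLdiffs, List.getElem_map, List.getElem_range]
    interval_cases i <;>
      simp only [pvK, List.getElem_cons_zero, List.getElem_cons_succ] <;>
      exact congrArg (pvD x) (by omega)

lemma pvBstep (x : Int) (j : Nat) :
    (fun (st : Int × Int × List Int × PySem.Dict (List Int) Int) =>
      let x' := nextSecret st.1
      let p := PySem.Int.mod x' 10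
      let w1 := st.2.2.1 ++ [p - st.2.1]
      let w := if 4 < PySem.List.len w1 then PySem.List.slice w1 (some 1) none else w1
      let res := if PySem.List.len w = 4 then PySem.Dict.setdefault st.2.2.2 w p else st.2.2.2
      (x', p, w, res))
      (pvS x j, pvP x j, pvW x j, pvRefD x j) =
      (pvS x (j + 1), pvP x (j + 1), pvW x (j + 1), pvRefD x (j + 1)) := by
  simp only
  rw [show nextSecret (pvS x j) = pvS x (j + 1) from rfl]
  rw [show PySem.Int.mod (pvS x (j + 1)) 10 = pvP x (j + 1) from rfl]
  have hd : pvP x (j + 1) - pvP x j = pvD x (j + 1) := by simp [pvD]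
  have hw1 : pvW x j ++ [pvP x (j + 1) - pvP x j] = pvW x j ++ [pvD x (j + 1)] := by rw [hd]
  have hwlen : (pvW x j ++ [pvD x (j + 1)]).length = min j 4 + 1 := by
    simp [pvW_length]
  have hW : (if 4 < PySem.List.len (pvW x j ++ [pvD x (j + 1)])
      then PySem.List.slice (pvW x j ++ [pvD x (j + 1)]) (some 1) none
      else pvW x j ++ [pvD x (j + 1)]) = pvW x (j + 1) := by
    rw [PySem.List.len_eq, PySem.List.slice_from_one, hwlen, pvW]
    by_cases h4 : 4 ≤ j
    · rw [if_pos (by exact_mod_cast by omega : (4 : Int) < ((min j 4 + 1 : Nat) : Int)),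
        if_pos (by simp [hwlen]; omega)]
    · rw [if_neg (by exact_mod_cast by omega : ¬ (4 : Int) < ((min j 4 + 1 : Nat) : Int)),
        if_neg (by simp [hwlen]; omega)]
  rw [hw1, hW]
  have hWlen1 : PySem.List.len (pvW x (j + 1)) = ((min (j + 1) 4 : Nat) : Int) := by
    rw [PySem.List.len_eq, pvW_length]
  by_cases h4 : 4 ≤ j + 1
  · rw [if_pos (by rw [hWlen1]; exact_mod_cast by omega : PySem.List.len (pvW x (j + 1)) = 4)]
    rw [pvW_eq_pvK x (j + 1) h4, pvRefD_succ x j h4]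
  · rw [if_neg (by rw [hWlen1]; exact_mod_cast by omega : ¬ PySem.List.len (pvW x (j + 1)) = 4)]
    rw [pvRefD, if_neg h4]

lemma pvB_lemma (x : Int) (n : Nat) :
    (PySem.List.pyRange 1 ((n : Int) + 1) 1).foldl
      (fun (st : Int × Int × List Int × PySem.Dict (List Int) Int) _ =>
        let x' := nextSecret st.1
        let p := PySem.Int.mod x' 10
        let w1 := st.2.2.1 ++ [p - st.2.1]
        let w := if 4 < PySem.List.len w1 then PySem.List.slice w1 (some 1) none else w1
        let res := if PySem.List.len w = 4 then PySem.Dict.setdefault st.2.2.2 w p else st.2.2.2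
        (x', p, w, res))
      (x, PySem.Int.mod x 10, ([] : List Int), (PySem.Dict.empty : PySem.Dict (List Int) Int)) =
      (pvS x n, pvP x n, pvW x n, pvRefD x n) := by
  induction n with
  | zero =>
    rw [PySem.List.pyRange_one_eq_nil (by norm_num)]
    rfl
  | succ n ih =>
    have hc : ((n + 1 : Nat) : Int) + 1 = ((n : Int) + 1) + 1 := by push_cast; ring
    rw [hc, PySem.List.pyRange_one_succ_right (by omega), List.foldl_append, ih]
    simp only [List.foldl_cons, List.foldl_nil]
    have hc2 : (n : Int) + 1 = ((n + 1 : Nat) : Int) := by push_cast; ring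
    exact pvBstep x n

-- ===== VERDICT (by name: the statement is the Claim_ definition above) =====
theorem getDiffsToPrices_spec : Claim_equal_getDiffsToPrices := by
  unfold Claim_equal_getDiffsToPrices Spec_getDiffsToPrices
  intro x N _
  unfold getDiffsToPrices getDiffsToPrices_alt
  by_cases hN : N ≤ 0
  · rw [PySem.List.pyRange_one_eq_nil hN, PySem.List.pyRange_one_eq_nil (by omega : N ≤ 1)]
    simp only [List.foldl_nil, List.map_nil]
    rw [PySem.List.pyRange_one_eq_nil (by simp [PySem.List.len_eq])]
    rfl
  · obtain ⟨n, rfl⟩ : ∃ n : Nat, N = (n : Int) := ⟨N.toNat, by omega⟩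
    have hn : 1 ≤ n := by omega
    simp only
    rw [pvPrices_lemma x n]
    simp only
    rw [pvDiffs_lemma x n hn]
    have hlen : PySem.List.len (pvDiffs x n) = (n : Int) := by
      rw [PySem.List.len_eq]
      simp [pvDiffs]
      omega
    rw [hlen, pvDictA_lemma x n hn n le_rfl]
    have hc : (n : Int) = ((n - 1 : Nat) : Int) + 1 := by push_cast [hn]; ring
    rw [hc, pvB_lemma x (n - 1)]
    simp only [List.map_map]
    refine (List.map_congr_left fun kv _ => ?_).trans (List.map_id _)
    simp [pvF, Function.comp, List.map_map]
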